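-- pv_equiv track=rewrite | github.com/narinderdev/Wealth-Management | management/views/summary.py | _fill_values_for_months
-- ===== SOURCE A (Python) =====
-- def _fill_values_for_months(month_map, months):
--     values = []
--     last_value = None
--     for month_key in months:
--         value = month_map.get(month_key)
--         if value is None:
--             value = last_value
--         else:
--             last_value = value
--         values.append(value)
--     if values and values[0] is None:
--         first_value = next((val for val in values if val is not None), None)
--         if first_value is not None:
--             values = [first_value if val is None else val for val in values]
--     return values
-- ===== SOURCE B (Python) =====
-- def _fill_values_for_months(month_map, months):
--     # seed with the earliest non-None value, then a single forward-fill pass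
--     last_value = next((month_map.get(m) for m in months if month_map.get(m) is not None), None)
--     values = []
--     for m in months:
--         v = month_map.get(m)
--         if v is not None:
--             last_value = v
--         values.append(last_value)
--     return values
-- ===== Notes on version B (the rewrite author's own statement) =====
-- stated objective: simpler
-- what changed: Replaces the forward-fill-then-global-backfill-comprehension with a seed scan for the earliest present value followed by a single forward-fill pass; the second pass over the produced list disappears.
import Mathlib
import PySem

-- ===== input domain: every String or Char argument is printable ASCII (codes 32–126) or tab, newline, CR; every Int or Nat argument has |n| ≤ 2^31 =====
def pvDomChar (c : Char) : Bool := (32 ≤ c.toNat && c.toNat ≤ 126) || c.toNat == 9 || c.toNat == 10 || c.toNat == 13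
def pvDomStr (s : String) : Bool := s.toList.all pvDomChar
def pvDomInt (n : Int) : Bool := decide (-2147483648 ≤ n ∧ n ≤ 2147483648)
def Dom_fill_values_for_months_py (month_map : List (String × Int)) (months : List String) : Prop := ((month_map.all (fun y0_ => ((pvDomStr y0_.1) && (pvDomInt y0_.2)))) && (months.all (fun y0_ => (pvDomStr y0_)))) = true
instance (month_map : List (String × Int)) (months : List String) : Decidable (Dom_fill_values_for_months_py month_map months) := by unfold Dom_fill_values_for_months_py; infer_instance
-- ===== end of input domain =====

-- B replaces A's forward-fill-then-global-backfill with a seed scan for the earliest present value plus one forward-fill pass (objective: simpler).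


-- ===== PORT A =====
-- loop: value = month_map.get(month_key); if None keep last_value else update it; append value
def fill_values_for_months_py (month_map : List (String × Int)) (months : List String) : List (Option Int) :=
  let values := (months.foldl (fun (st : List (Option Int) × Option Int) month_key =>
      match PySem.Dict.get? (PySem.Dict.ofList month_map) month_key with
      | none => (st.1 ++ [st.2], st.2)
      | some v => (st.1 ++ [some v], some v)) ([], none)).1
  -- 'if values and values[0] is None' = the head exists and is None
  if values.head? = some none then
    -- first_value = next((val for val in values if val is not None), None)
    match values.findSome? (fun val => val) with
    | some first_value => values.map (fun val => if val = none then some first_value else val)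
    | none => values
  else values

-- ===== PORT B =====
def fill_values_for_months_py_alt (month_map : List (String × Int)) (months : List String) : List (Option Int) :=
  -- seed: next((month_map.get(m) for m in months if month_map.get(m) is not None), None)
  let seed := months.findSome? (fun m => PySem.Dict.get? (PySem.Dict.ofList month_map) m)
  (months.foldl (fun (st : List (Option Int) × Option Int) m =>
      let last_value := match PySem.Dict.get? (PySem.Dict.ofList month_map) m with
        | some v => some v
        | none => st.2
      (st.1 ++ [last_value], last_value)) ([], seed)).1

-- ===== PRECONDITION & SPEC =====
def Spec_fill_values_for_months_py (month_map : List (String × Int)) (months : List String) (out : List (Option Int)) : Prop := out = fill_values_for_months_py_alt month_map months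
instance (month_map : List (String × Int)) (months : List String) (out : List (Option Int)) : Decidable (Spec_fill_values_for_months_py month_map months out) := by unfold Spec_fill_values_for_months_py; infer_instance

-- ===== CLAIM (what is proved, stated in full; the proofs are below) =====
def Claim_equal_fill_values_for_months_py : Prop := ∀ (month_map : List (String × Int)) (months : List String), Dom_fill_values_for_months_py month_map months → Spec_fill_values_for_months_py month_map months (fill_values_for_months_py month_map months)

-- ===== LEMMAS AND PROOFS =====

-- structural form of the forward-fill loop body, shared characterisation of both loops
def fillF (g : String → Option Int) : Option Int → List String → List (Option Int)
  | _, [] => []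
  | last, m :: ms => match g m with
    | none => last :: fillF g last ms
    | some v => some v :: fillF g (some v) ms

theorem loopA_eq (month_map : List (String × Int)) (ms : List String)
    (acc : List (Option Int)) (last : Option Int) :
    (ms.foldl (fun (st : List (Option Int) × Option Int) month_key =>
      match PySem.Dict.get? (PySem.Dict.ofList month_map) month_key with
      | none => (st.1 ++ [st.2], st.2)
      | some v => (st.1 ++ [some v], some v)) (acc, last)).1
    = acc ++ fillF (fun m => PySem.Dict.get? (PySem.Dict.ofList month_map) m) last ms := by
  induction ms generalizing acc last with
  | nil => simp [fillF]
  | cons m ms ih =>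
    simp only [List.foldl, fillF]
    cases PySem.Dict.get? (PySem.Dict.ofList month_map) m <;> simp [ih]

theorem loopB_eq (month_map : List (String × Int)) (ms : List String)
    (acc : List (Option Int)) (last : Option Int) :
    (ms.foldl (fun (st : List (Option Int) × Option Int) m =>
      let last_value := match PySem.Dict.get? (PySem.Dict.ofList month_map) m with
        | some v => some v
        | none => st.2
      (st.1 ++ [last_value], last_value)) (acc, last)).1
    = acc ++ fillF (fun m => PySem.Dict.get? (PySem.Dict.ofList month_map) m) last ms := by
  induction ms generalizing acc last with
  | nil => simp [fillF]
  | cons m ms ih =>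
    simp only [List.foldl, fillF]
    cases PySem.Dict.get? (PySem.Dict.ofList month_map) m <;> simp [ih]

-- once the running value is present, no None is ever produced, so the backfill map is the identity there
theorem map_fill_some (g : String → Option Int) (ms : List String) (v : Int) (w : Option Int) :
    (fillF g (some v) ms).map (fun val => if val = none then w else val) = fillF g (some v) ms := by
  induction ms generalizing v with
  | nil => simp [fillF]
  | cons m ms ih =>
    simp only [fillF]
    cases g m <;> simp [ih]

-- backfilling the None-prefix with v is the same as seeding the loop with v
theorem fill_replace (g : String → Option Int) (ms : List String) (v : Int) :
    (fillF g none ms).map (fun val => if val = none then some v else val)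
      = fillF g (some v) ms := by
  induction ms with
  | nil => simp [fillF]
  | cons m ms ih =>
    simp only [fillF]
    cases h : g m with
    | none => simp [ih]
    | some w => simp [map_fill_some]

-- the first non-None of the fill starting from None is the first hit of g on ms
theorem find_fill (g : String → Option Int) (ms : List String) :
    (fillF g none ms).findSome? (fun val => val) = ms.findSome? g := by
  induction ms with
  | nil => simp [fillF]
  | cons m ms ih =>
    simp only [fillF, List.findSome?]
    cases g m <;> simp [ih]

theorem main_eq (month_map : List (String × Int)) (months : List String) :
    fill_values_for_months_py month_map months = fill_values_for_months_py_alt month_map months := by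
  unfold fill_values_for_months_py fill_values_for_months_py_alt
  simp only [loopA_eq, loopB_eq, List.nil_append]
  set g := fun m => PySem.Dict.get? (PySem.Dict.ofList month_map) m with hg
  by_cases hh : (fillF g none months).head? = some none
  · simp only [hh, if_pos rfl, find_fill]
    cases hf : months.findSome? g with
    | none =>
      -- all lookups miss: the fill is already what seeding with none produces
      rfl
    | some v => exact fill_replace g months v
  · simp only [if_neg hh]
    cases months with
    | nil => rfl
    | cons m ms =>
      -- head is not None, so g m hit: both sides start the loop with that value
      cases h : g m with
      | none => exact absurd (by simp [fillF, h]) hh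
      | some v => simp [fillF, h, List.findSome?]

-- ===== VERDICT (by name: the statement is the Claim_ definition above) =====
theorem fill_values_for_months_py_spec : Claim_equal_fill_values_for_months_py := by
  intro month_map months _
  unfold Spec_fill_values_for_months_py
  exact main_eq month_map months
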